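-- pv_equiv track=rewrite | github.com/dougwinr/VGC-SIM | data/species_loader.py | _infer_generation
-- ===== SOURCE A (Python) =====
-- from typing import Any, Dict, List, Optional, Tuple
--
-- def _infer_generation(dex_num: int, tags: List[str]) -> int:
--     """Infer generation from Pokedex number and tags."""
--     # Check tags for specific generations
--     for tag in tags:
--         if tag.startswith("Gen"):
--             try:
--                 return int(tag[3:])
--             except ValueError:
--                 pass
--
--     # Infer from dex number
--     if dex_num <= 0:
--         return 0
--     elif dex_num <= 151:
--         return 1
--     elif dex_num <= 251:
--         return 2
--     elif dex_num <= 386: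
--         return 3
--     elif dex_num <= 493:
--         return 4
--     elif dex_num <= 649:
--         return 5
--     elif dex_num <= 721:
--         return 6
--     elif dex_num <= 809:
--         return 7
--     elif dex_num <= 905:
--         return 8
--     else:
--         return 9
-- ===== SOURCE B (Python) =====
-- from typing import List, Optional
--
-- # Generation upper bounds, sorted: gen g covers dex numbers <= _UPPER[g].
-- _UPPER = (0, 151, 251, 386, 493, 649, 721, 809, 905)
--
-- def _parse_gen_tag(tag: str) -> Optional[int]:
--     if not tag.startswith("Gen"):
--         return None
--     try:
--         return int(tag[3:])
--     except ValueError: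
--         return None
--
-- def _bisect_left(a, x: int, lo: int, hi: int) -> int:
--     # binary search: insertion point of x in sorted a, i.e. #elements < x
--     while lo < hi:
--         mid = (lo + hi) // 2
--         if a[mid] < x:
--             lo = mid + 1
--         else:
--             hi = mid
--     return lo
--
-- def _infer_generation(dex_num: int, tags: List[str]) -> int:
--     g = next((v for v in map(_parse_gen_tag, tags) if v is not None), None)
--     if g is not None:
--         return g
--     # generation = insertion point of dex_num in the sorted bound table
--     return _bisect_left(_UPPER, dex_num, 0, len(_UPPER))
-- ===== Notes on version B (the rewrite author's own statement) =====
-- stated objective: alternative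
-- what changed: The elif comparison cascade over dex ranges is replaced by a hand-written binary search (bisect_left) over a sorted table of generation upper bounds, and the tag loop becomes a generator first-match over a parse helper.
import Mathlib
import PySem

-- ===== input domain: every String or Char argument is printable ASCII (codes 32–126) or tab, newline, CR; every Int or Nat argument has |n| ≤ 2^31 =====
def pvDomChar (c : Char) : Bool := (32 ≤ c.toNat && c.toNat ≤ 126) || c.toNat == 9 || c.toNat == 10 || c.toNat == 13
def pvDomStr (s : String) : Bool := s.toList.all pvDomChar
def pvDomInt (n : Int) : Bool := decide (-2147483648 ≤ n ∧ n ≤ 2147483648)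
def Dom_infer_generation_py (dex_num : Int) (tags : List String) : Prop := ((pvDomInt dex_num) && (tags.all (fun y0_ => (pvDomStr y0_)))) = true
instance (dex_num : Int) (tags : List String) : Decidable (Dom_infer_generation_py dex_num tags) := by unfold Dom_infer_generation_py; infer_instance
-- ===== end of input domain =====

-- B replaces A's elif cascade by a hand-written binary search (bisect_left) over a sorted bound table, and the tag loop by a recursive first-match scan (alternative decomposition; same cost).


-- ===== PORT A =====
-- the for-loop with its early return: returns `some v` at the first tag starting with
-- "Gen" whose remainder parses as an int (ValueError is skipped), else `none`
def inferGenLoop : List String → Option Int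
  | [] => none
  | tag :: rest =>
    if PySem.Str.startswith tag "Gen" then
      match PySem.Int.ofStr? (PySem.Str.slice tag (some 3) none) with
      | some v => some v
      | none => inferGenLoop rest
    else inferGenLoop rest

def infer_generation_py (dex_num : Int) (tags : List String) : Int :=
  match inferGenLoop tags with
  | some v => v
  | none =>
    if dex_num ≤ 0 then 0
    else if dex_num ≤ 151 then 1
    else if dex_num ≤ 251 then 2
    else if dex_num ≤ 386 then 3
    else if dex_num ≤ 493 then 4
    else if dex_num ≤ 649 then 5
    else if dex_num ≤ 721 then 6
    else if dex_num ≤ 809 then 7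
    else if dex_num ≤ 905 then 8
    else 9

-- ===== PORT B =====
def genUpper : List Int := [0, 151, 251, 386, 493, 649, 721, 809, 905]

def parseGenTag (tag : String) : Option Int :=
  if PySem.Str.startswith tag "Gen" then
    PySem.Int.ofStr? (PySem.Str.slice tag (some 3) none)
  else none

-- hand-written bisect_left from Source B: insertion point of x in sorted a
def bisectLeft (a : List Int) (x : Int) (lo hi : Nat) : Nat :=
  if _h : lo < hi then
    let mid := (lo + hi) / 2
    if a.getD mid 0 < x then bisectLeft a x (mid + 1) hi
    else bisectLeft a x lo mid
  else lo
termination_by hi - lo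
decreasing_by all_goals omega

def infer_generation_py_alt (dex_num : Int) (tags : List String) : Int :=
  match tags.findSome? parseGenTag with
  | some g => g
  | none => (bisectLeft genUpper dex_num 0 genUpper.length : Int)

-- ===== PRECONDITION & SPEC =====
def Spec_infer_generation_py (dex_num : Int) (tags : List String) (out : Int) : Prop := out = infer_generation_py_alt dex_num tags
instance (dex_num : Int) (tags : List String) (out : Int) : Decidable (Spec_infer_generation_py dex_num tags out) := by unfold Spec_infer_generation_py; infer_instance

-- ===== CLAIM (what is proved, stated in full; the proofs are below) =====
def Claim_equal_infer_generation_py : Prop := ∀ (dex_num : Int) (tags : List String), Dom_infer_generation_py dex_num tags → Spec_infer_generation_py dex_num tags (infer_generation_py dex_num tags)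

-- ===== LEMMAS AND PROOFS =====
theorem inferGenLoop_eq_findSome? (tags : List String) :
    inferGenLoop tags = tags.findSome? parseGenTag := by
  induction tags with
  | nil => rfl
  | cons tag rest ih =>
    rw [List.findSome?_cons]
    by_cases h : PySem.Str.startswith tag "Gen" = true
    · have hp : parseGenTag tag = PySem.Int.ofStr? (PySem.Str.slice tag (some 3) none) := by
        unfold parseGenTag; rw [if_pos h]
      unfold inferGenLoop
      rw [if_pos h, hp]
      cases PySem.Int.ofStr? (PySem.Str.slice tag (some 3) none) <;> simp [ih]
    · have hp : parseGenTag tag = none := by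
        unfold parseGenTag; rw [if_neg h]
      unfold inferGenLoop
      rw [if_neg h, hp, ih]

theorem cascade_eq_bisect (dex_num : Int) :
    (if dex_num ≤ 0 then (0:Int)
     else if dex_num ≤ 151 then 1
     else if dex_num ≤ 251 then 2
     else if dex_num ≤ 386 then 3
     else if dex_num ≤ 493 then 4
     else if dex_num ≤ 649 then 5
     else if dex_num ≤ 721 then 6
     else if dex_num ≤ 809 then 7
     else if dex_num ≤ 905 then 8
     else 9)
    = (bisectLeft genUpper dex_num 0 genUpper.length : Int) := by
  have h : ∀ lo hi : Nat, bisectLeft [0, 151, 251, 386, 493, 649, 721, 809, 905] dex_num lo hi =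
      if _h : lo < hi then
        if List.getD [(0:Int), 151, 251, 386, 493, 649, 721, 809, 905] ((lo + hi) / 2) 0 < dex_num then
          bisectLeft [0, 151, 251, 386, 493, 649, 721, 809, 905] dex_num ((lo + hi) / 2 + 1) hi
        else bisectLeft [0, 151, 251, 386, 493, 649, 721, 809, 905] dex_num lo ((lo + hi) / 2)
      else lo := fun lo hi => by rw [bisectLeft]
  simp only [genUpper, List.length_cons, List.length_nil, Nat.reduceAdd]
  rw [h 0 9]; norm_num [List.getD]
  rw [h 5 9, h 0 4]; norm_num [List.getD]
  rw [h 8 9, h 5 7, h 3 4, h 0 2]; norm_num [List.getD]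
  rw [h 9 9, h 8 8, h 7 7, h 5 6, h 4 4, h 3 3, h 2 2, h 0 1]; norm_num [List.getD]
  rw [h 6 6, h 5 5, h 1 1, h 0 0]; norm_num [List.getD]
  split_ifs <;> omega

-- ===== VERDICT (by name: the statement is the Claim_ definition above) =====
theorem infer_generation_py_spec : Claim_equal_infer_generation_py := by
  intro dex_num tags _
  unfold Spec_infer_generation_py infer_generation_py infer_generation_py_alt
  rw [inferGenLoop_eq_findSome?]
  cases tags.findSome? parseGenTag
  · exact cascade_eq_bisect dex_num
  · rfl
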